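-- pv_equiv track=rewrite | github.com/qthequartermasterman/lantern-party | backend/games/fib/game.py | _score_question
-- ===== SOURCE A (Python) =====
-- from dataclasses import dataclass, field
--
-- @dataclass
-- class Player:
--     id: str
--     name: str
--     score: int = 0
--     ready: bool = False
--     is_connected: bool = True
--
-- def _score_question(
--     choice_keys: list[str],
--     votes: dict[str, int],
--     game_provided: set[str],
--     lie_for_me_players: set[str],
--     round_mult: int,
--     players: dict[str, Player],
-- ) -> dict[str, int]:
--     """
--     Compute score deltas for one question.
--
--     choice_keys[i]  = "truth" | player_id  for the choice at index i.
--     votes[voter_id] = choice_index the voter selected.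
--
--     Returns {player_id: delta} (only non-zero entries).
--     """
--     deltas: dict[str, int] = {}
--
--     for voter_id, choice_idx in votes.items():
--         if voter_id not in players:
--             continue
--         if choice_idx < 0 or choice_idx >= len(choice_keys):
--             continue
--         key = choice_keys[choice_idx]
--         if key == "truth":
--             deltas[voter_id] = deltas.get(voter_id, 0) + 1000 * round_mult
--         elif key in game_provided:
--             # Voted for a game-provided (auto) lie → penalty
--             deltas[voter_id] = deltas.get(voter_id, 0) - 500 * round_mult
--
--     # Fooling points for each liar
--     for liar_id in players:
--         if liar_id not in choice_keys:
--             continue  # player may have had game-provided lie with no separate key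
--         fooled = sum(
--             1
--             for voter_id, choice_idx in votes.items()
--             if choice_idx < len(choice_keys)
--             and choice_keys[choice_idx] == liar_id
--             and voter_id != liar_id
--         )
--         if fooled == 0:
--             continue
--         if liar_id in game_provided:
--             if liar_id in lie_for_me_players:
--                 # Half points for "Lie for me!" users
--                 deltas[liar_id] = deltas.get(liar_id, 0) + 250 * round_mult * fooled
--             # else auto-timeout: 0 fooling points
--         else:
--             deltas[liar_id] = deltas.get(liar_id, 0) + 500 * round_mult * fooled
--
--     return deltas
-- ===== SOURCE B (Python) =====
-- def _score_question(
--     choice_keys,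
--     votes,
--     game_provided,
--     lie_for_me_players,
--     round_mult,
--     players,
-- ):
--     """One pass over the votes builds both the voter deltas and a per-choice-key
--     vote counter; each liar's "fooled" count is then a counter lookup minus a
--     possible self-vote, instead of a full rescan of the votes."""
--     n = len(choice_keys)
--     key_set = set(choice_keys)
--     deltas = {}
--     counts = {}
--     for voter_id, idx in votes.items():
--         if 0 <= idx < n:
--             key = choice_keys[idx]
--             counts[key] = counts.get(key, 0) + 1
--             if voter_id in players:
--                 if key == "truth":
--                     deltas[voter_id] = deltas.get(voter_id, 0) + 1000 * round_mult
--                 elif key in game_provided: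
--                     deltas[voter_id] = deltas.get(voter_id, 0) - 500 * round_mult
--
--     for liar_id in players:
--         if liar_id not in key_set:
--             continue
--         fooled = counts.get(liar_id, 0)
--         v = votes.get(liar_id)
--         if v is not None and 0 <= v < n and choice_keys[v] == liar_id:
--             fooled -= 1
--         if fooled == 0:
--             continue
--         if liar_id in game_provided:
--             if liar_id in lie_for_me_players:
--                 deltas[liar_id] = deltas.get(liar_id, 0) + 250 * round_mult * fooled
--         else:
--             deltas[liar_id] = deltas.get(liar_id, 0) + 500 * round_mult * fooled
--
--     return deltas
-- ===== Notes on version B (the rewrite author's own statement) =====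
-- stated objective: faster
-- what changed: One pass over the votes builds both the voter deltas and a per-choice-key vote counter (plus a prebuilt set of choice keys), so each liar's fooled count becomes a counter lookup minus a possible self-vote instead of A's rescan of all votes for every player.
-- intended difference: On inputs where some vote has a negative in-range index whose wrapped-around choice key is another player not on the no-points path, A counts that vote as a fooling vote via Python's negative-index wraparound while B ignores it (exactly as A's own first loop skips negative indices), which is the intended reading. — e.g. on _score_question(["truth", "p2"], [("p1", -1)], [], [], 1, [("p1", 0), ("p2", 0)]): A returns [("p2", 500)], B returns []
import Mathlib
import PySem

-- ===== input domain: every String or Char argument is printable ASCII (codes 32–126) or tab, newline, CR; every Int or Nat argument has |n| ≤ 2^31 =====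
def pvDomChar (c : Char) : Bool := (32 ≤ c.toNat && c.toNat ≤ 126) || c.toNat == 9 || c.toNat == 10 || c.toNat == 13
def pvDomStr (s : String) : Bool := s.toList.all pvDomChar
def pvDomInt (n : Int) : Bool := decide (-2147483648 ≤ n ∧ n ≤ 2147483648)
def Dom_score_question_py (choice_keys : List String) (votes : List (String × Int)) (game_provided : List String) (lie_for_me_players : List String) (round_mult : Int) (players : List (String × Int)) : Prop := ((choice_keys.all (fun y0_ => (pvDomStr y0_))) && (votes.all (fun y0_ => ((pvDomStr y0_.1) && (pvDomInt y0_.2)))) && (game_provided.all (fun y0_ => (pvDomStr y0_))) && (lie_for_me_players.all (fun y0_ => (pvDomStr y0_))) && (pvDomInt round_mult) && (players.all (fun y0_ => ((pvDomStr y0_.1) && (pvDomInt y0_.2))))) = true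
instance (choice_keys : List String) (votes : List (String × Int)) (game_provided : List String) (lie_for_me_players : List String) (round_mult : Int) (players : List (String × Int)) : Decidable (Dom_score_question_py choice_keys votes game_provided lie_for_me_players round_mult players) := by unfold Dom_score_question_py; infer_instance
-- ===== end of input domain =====

-- B replaces A's per-player rescan of all votes by one counting pass over the votes
-- (objective: faster); equivalence is about the returned dict (no argument is mutated).

-- ===== PORT A =====
-- dict/set arguments travel as assoc lists / element lists; both ports normalize them
-- with PySem.Dict.ofList exactly as Python's dict construction does.
-- In A's fooling count, Python evaluates choice_keys[choice_idx] for any choice_idx < len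
-- (negative indices wrap; choice_idx < -len raises IndexError — excluded by Pre_ below,
-- where the total pyGetD with default "" stands in for the raising access).
def score_question_py (choice_keys : List String) (votes : List (String × Int)) (game_provided : List String) (lie_for_me_players : List String) (round_mult : Int) (players : List (String × Int)) : List (String × Int) :=
  let vd := PySem.Dict.ofList votes
  let pd := PySem.Dict.ofList players
  let n : Int := (choice_keys.length : Int)
  let deltas1 :=
    vd.items.foldl (fun d vi =>
      if vi.1 ∉ pd.keys then d
      else if vi.2 < 0 ∨ n ≤ vi.2 then d
      else
        let key := PySem.List.pyGetD choice_keys vi.2 ""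
        if key = "truth" then d.insert vi.1 (d.getD vi.1 0 + 1000 * round_mult)
        else if key ∈ game_provided then d.insert vi.1 (d.getD vi.1 0 - 500 * round_mult)
        else d) PySem.Dict.empty
  let deltas2 :=
    pd.keys.foldl (fun d liar =>
      if liar ∉ choice_keys then d
      else
        let fooled : Int :=
          vd.items.foldl (fun s wi =>
            if wi.2 < n ∧ PySem.List.pyGetD choice_keys wi.2 "" = liar ∧ wi.1 ≠ liar then s + 1
            else s) 0
        if fooled = 0 then d
        else if liar ∈ game_provided then
          if liar ∈ lie_for_me_players then d.insert liar (d.getD liar 0 + 250 * round_mult * fooled)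
          else d
        else d.insert liar (d.getD liar 0 + 500 * round_mult * fooled)) deltas1
  deltas2.items

-- ===== PORT B =====
def score_question_py_alt (choice_keys : List String) (votes : List (String × Int)) (game_provided : List String) (lie_for_me_players : List String) (round_mult : Int) (players : List (String × Int)) : List (String × Int) :=
  let vd := PySem.Dict.ofList votes
  let pd := PySem.Dict.ofList players
  let n : Int := (choice_keys.length : Int)
  let keySet := PySem.Set.ofList choice_keys
  let p1 :=
    vd.items.foldl (fun (dc : PySem.Dict String Int × PySem.Dict String Int) vi =>
      if 0 ≤ vi.2 ∧ vi.2 < n then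
        let key := PySem.List.pyGetD choice_keys vi.2 ""
        let c' := dc.2.insert key (dc.2.getD key 0 + 1)
        if vi.1 ∈ pd.keys then
          if key = "truth" then (dc.1.insert vi.1 (dc.1.getD vi.1 0 + 1000 * round_mult), c')
          else if key ∈ game_provided then (dc.1.insert vi.1 (dc.1.getD vi.1 0 - 500 * round_mult), c')
          else (dc.1, c')
        else (dc.1, c')
      else dc) (PySem.Dict.empty, PySem.Dict.empty)
  let counts := p1.2
  let out :=
    pd.keys.foldl (fun d liar =>
      if liar ∉ keySet then d
      else
        let selfVote : Int :=
          match vd.get? liar with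
          | some v => if 0 ≤ v ∧ v < n ∧ PySem.List.pyGetD choice_keys v "" = liar then 1 else 0
          | none => 0
        let fooled : Int := counts.getD liar 0 - selfVote
        if fooled = 0 then d
        else if liar ∈ game_provided then
          if liar ∈ lie_for_me_players then d.insert liar (d.getD liar 0 + 250 * round_mult * fooled)
          else d
        else d.insert liar (d.getD liar 0 + 500 * round_mult * fooled)) p1.1
  out.items

-- ===== PRECONDITION & SPEC =====
-- Pre_ excludes exactly the inputs where A raises IndexError: some vote index below
-- -len(choice_keys) while some player id occurs among the choice keys (there A's fooling
-- count evaluates choice_keys[choice_idx] on the out-of-range index and raises).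
def Pre_score_question_py (choice_keys : List String) (votes : List (String × Int)) (game_provided : List String) (lie_for_me_players : List String) (round_mult : Int) (players : List (String × Int)) : Prop :=
  (∀ wi ∈ (PySem.Dict.ofList votes).items, -(choice_keys.length : Int) ≤ wi.2) ∨
  (∀ k ∈ (PySem.Dict.ofList players).keys, k ∉ choice_keys)
instance (choice_keys : List String) (votes : List (String × Int)) (game_provided : List String) (lie_for_me_players : List String) (round_mult : Int) (players : List (String × Int)) : Decidable (Pre_score_question_py choice_keys votes game_provided lie_for_me_players round_mult players) := by unfold Pre_score_question_py; infer_instance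

def pvWitness_score_question_py : List String × (List (String × Int)) × List String × List String × Int × (List (String × Int)) :=
  (["truth", "p2"], [("p1", 0), ("p2", 1)], [], [], 1, [("p1", 0), ("p2", 0)])

-- On inputs where some vote has a negative in-range index whose wrapped-around choice key
-- is another player who would earn fooling points from it, A counts that vote as a fooling
-- vote via Python's negative-index wraparound while B ignores it (exactly as A's own first
-- loop skips negative indices), which is the intended reading.
def D_score_question_py (choice_keys : List String) (votes : List (String × Int)) (game_provided : List String) (lie_for_me_players : List String) (round_mult : Int) (players : List (String × Int)) : Prop :=
  ∃ k ∈ players.map Prod.fst, ∃ wi ∈ (PySem.Dict.ofList votes).items,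
    wi.2 < 0 ∧ -↑choice_keys.length ≤ wi.2 ∧
    choice_keys.getD (↑choice_keys.length + wi.2).toNat "" = k ∧ wi.1 ≠ k ∧
    (k ∉ game_provided ∨ k ∈ lie_for_me_players) ∧
    (round_mult ≠ 0 ∨ ∀ wj ∈ (PySem.Dict.ofList votes).items,
      wj.2 < 0 ∨ ↑choice_keys.length ≤ wj.2 ∨
        ((choice_keys.getD wj.2.toNat "" ≠ k ∨ wj.1 = k) ∧
         (wj.1 ≠ k ∨ (choice_keys.getD wj.2.toNat "" ≠ "truth" ∧ choice_keys.getD wj.2.toNat "" ∉ game_provided))))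
instance (choice_keys : List String) (votes : List (String × Int)) (game_provided : List String) (lie_for_me_players : List String) (round_mult : Int) (players : List (String × Int)) : Decidable (D_score_question_py choice_keys votes game_provided lie_for_me_players round_mult players) := by unfold D_score_question_py; infer_instance

def Spec_score_question_py (choice_keys : List String) (votes : List (String × Int)) (game_provided : List String) (lie_for_me_players : List String) (round_mult : Int) (players : List (String × Int)) (out : List (String × Int)) : Prop := ¬ D_score_question_py choice_keys votes game_provided lie_for_me_players round_mult players → out = score_question_py_alt choice_keys votes game_provided lie_for_me_players round_mult players
instance (choice_keys : List String) (votes : List (String × Int)) (game_provided : List String) (lie_for_me_players : List String) (round_mult : Int) (players : List (String × Int)) (out : List (String × Int)) : Decidable (Spec_score_question_py choice_keys votes game_provided lie_for_me_players round_mult players out) := by unfold Spec_score_question_py; infer_instance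

def pvDiffWitness_score_question_py : List String × (List (String × Int)) × List String × List String × Int × (List (String × Int)) :=
  (["truth", "p2"], [("p1", -1)], [], [], 1, [("p1", 0), ("p2", 0)])
def pvDiffWitnessOut_score_question_py : (List (String × Int)) × (List (String × Int)) := ([("p2", 500)], [])

-- ===== CLAIM (what is proved, stated in full; the proofs are below) =====
def Claim_unchanged_score_question_py : Prop := ∀ (choice_keys : List String) (votes : List (String × Int)) (game_provided : List String) (lie_for_me_players : List String) (round_mult : Int) (players : List (String × Int)), Dom_score_question_py choice_keys votes game_provided lie_for_me_players round_mult players → Pre_score_question_py choice_keys votes game_provided lie_for_me_players round_mult players → Spec_score_question_py choice_keys votes game_provided lie_for_me_players round_mult players (score_question_py choice_keys votes game_provided lie_for_me_players round_mult players)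
def Claim_changed_score_question_py : Prop := Dom_score_question_py (pvDiffWitness_score_question_py.1) (pvDiffWitness_score_question_py.2.1) (pvDiffWitness_score_question_py.2.2.1) (pvDiffWitness_score_question_py.2.2.2.1) (pvDiffWitness_score_question_py.2.2.2.2.1) (pvDiffWitness_score_question_py.2.2.2.2.2) ∧ Pre_score_question_py (pvDiffWitness_score_question_py.1) (pvDiffWitness_score_question_py.2.1) (pvDiffWitness_score_question_py.2.2.1) (pvDiffWitness_score_question_py.2.2.2.1) (pvDiffWitness_score_question_py.2.2.2.2.1) (pvDiffWitness_score_question_py.2.2.2.2.2) ∧ D_score_question_py (pvDiffWitness_score_question_py.1) (pvDiffWitness_score_question_py.2.1) (pvDiffWitness_score_question_py.2.2.1) (pvDiffWitness_score_question_py.2.2.2.1) (pvDiffWitness_score_question_py.2.2.2.2.1) (pvDiffWitness_score_question_py.2.2.2.2.2) ∧ score_question_py (pvDiffWitness_score_question_py.1) (pvDiffWitness_score_question_py.2.1) (pvDiffWitness_score_question_py.2.2.1) (pvDiffWitness_score_question_py.2.2.2.1) (pvDiffWitness_score_question_py.2.2.2.2.1) (pvDiffWitness_score_question_py.2.2.2.2.2)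 = pvDiffWitnessOut_score_question_py.1 ∧ score_question_py_alt (pvDiffWitness_score_question_py.1) (pvDiffWitness_score_question_py.2.1) (pvDiffWitness_score_question_py.2.2.1) (pvDiffWitness_score_question_py.2.2.2.1) (pvDiffWitness_score_question_py.2.2.2.2.1) (pvDiffWitness_score_question_py.2.2.2.2.2) = pvDiffWitnessOut_score_question_py.2 ∧ pvDiffWitnessOut_score_question_py.1 ≠ pvDiffWitnessOut_score_question_py.2
def Claim_exact_score_question_py : Prop := ∀ (choice_keys : List String) (votes : List (String × Int)) (game_provided : List String) (lie_for_me_players : List String) (round_mult : Int) (players : List (String × Int)), Dom_score_question_py choice_keys votes game_provided lie_for_me_players round_mult players → Pre_score_question_py choice_keys votes game_provided lie_for_me_players round_mult players → D_score_question_py choice_keys votes game_provided lie_for_me_players round_mult players → score_question_py choice_keys votes game_provided lie_for_me_players round_mult players ≠ score_question_py_alt choice_keys votes game_provided lie_for_me_players round_mult players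

-- ===== LEMMAS AND PROOFS =====

-- Named copies of the two ports' loop bodies (defeq to the lambdas in the ports).
def stepA1 (pd : PySem.Dict String Int) (ck gp : List String) (mult : Int)
    (d : PySem.Dict String Int) (vi : String × Int) : PySem.Dict String Int :=
  if vi.1 ∉ pd.keys then d
  else if vi.2 < 0 ∨ (ck.length : Int) ≤ vi.2 then d
  else
    let key := PySem.List.pyGetD ck vi.2 ""
    if key = "truth" then d.insert vi.1 (d.getD vi.1 0 + 1000 * mult)
    else if key ∈ gp then d.insert vi.1 (d.getD vi.1 0 - 500 * mult)
    else d

def fooledA (ck : List String) (vitems : List (String × Int)) (liar : String) : Int :=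
  vitems.foldl (fun s wi =>
    if wi.2 < (ck.length : Int) ∧ PySem.List.pyGetD ck wi.2 "" = liar ∧ wi.1 ≠ liar then s + 1
    else s) 0

def stepA2 (vd : PySem.Dict String Int) (ck gp lfm : List String) (mult : Int)
    (d : PySem.Dict String Int) (liar : String) : PySem.Dict String Int :=
  if liar ∉ ck then d
  else
    let fooled : Int := fooledA ck vd.items liar
    if fooled = 0 then d
    else if liar ∈ gp then
      if liar ∈ lfm then d.insert liar (d.getD liar 0 + 250 * mult * fooled)
      else d
    else d.insert liar (d.getD liar 0 + 500 * mult * fooled)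

def stepB1 (pd : PySem.Dict String Int) (ck gp : List String) (mult : Int)
    (dc : PySem.Dict String Int × PySem.Dict String Int) (vi : String × Int) :
    PySem.Dict String Int × PySem.Dict String Int :=
  if 0 ≤ vi.2 ∧ vi.2 < (ck.length : Int) then
    let key := PySem.List.pyGetD ck vi.2 ""
    let c' := dc.2.insert key (dc.2.getD key 0 + 1)
    if vi.1 ∈ pd.keys then
      if key = "truth" then (dc.1.insert vi.1 (dc.1.getD vi.1 0 + 1000 * mult), c')
      else if key ∈ gp then (dc.1.insert vi.1 (dc.1.getD vi.1 0 - 500 * mult), c')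
      else (dc.1, c')
    else (dc.1, c')
  else dc

def selfVote (vd : PySem.Dict String Int) (ck : List String) (liar : String) : Int :=
  match vd.get? liar with
  | some v => if 0 ≤ v ∧ v < (ck.length : Int) ∧ PySem.List.pyGetD ck v "" = liar then 1 else 0
  | none => 0

def stepB2 (vd counts : PySem.Dict String Int) (ck gp lfm : List String) (mult : Int)
    (d : PySem.Dict String Int) (liar : String) : PySem.Dict String Int :=
  if liar ∉ PySem.Set.ofList ck then d
  else
    let fooled : Int := counts.getD liar 0 - selfVote vd ck liar
    if fooled = 0 then d
    else if liar ∈ gp then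
      if liar ∈ lfm then d.insert liar (d.getD liar 0 + 250 * mult * fooled)
      else d
    else d.insert liar (d.getD liar 0 + 500 * mult * fooled)

-- the ports, re-expressed through the named step functions (definitional)
lemma A_eq (ck : List String) (votes : List (String × Int)) (gp lfm : List String)
    (mult : Int) (players : List (String × Int)) :
    score_question_py ck votes gp lfm mult players =
      ((PySem.Dict.ofList players).keys.foldl
        (stepA2 (PySem.Dict.ofList votes) ck gp lfm mult)
        ((PySem.Dict.ofList votes).items.foldl
          (stepA1 (PySem.Dict.ofList players) ck gp mult) PySem.Dict.empty)).items := rfl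

lemma B_eq (ck : List String) (votes : List (String × Int)) (gp lfm : List String)
    (mult : Int) (players : List (String × Int)) :
    score_question_py_alt ck votes gp lfm mult players =
      ((PySem.Dict.ofList players).keys.foldl
        (stepB2 (PySem.Dict.ofList votes)
          ((PySem.Dict.ofList votes).items.foldl
            (stepB1 (PySem.Dict.ofList players) ck gp mult)
            (PySem.Dict.empty, PySem.Dict.empty)).2 ck gp lfm mult)
        (((PySem.Dict.ofList votes).items.foldl
          (stepB1 (PySem.Dict.ofList players) ck gp mult)
          (PySem.Dict.empty, PySem.Dict.empty)).1)).items := rfl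

-- Bool counting predicates for in-range, wrapped and self votes
def posP (ck : List String) (liar : String) (wi : String × Int) : Bool :=
  decide (0 ≤ wi.2 ∧ wi.2 < (ck.length : Int) ∧ PySem.List.pyGetD ck wi.2 "" = liar ∧ wi.1 ≠ liar)
def wrapP (ck : List String) (liar : String) (wi : String × Int) : Bool :=
  decide (wi.2 < 0 ∧ PySem.List.pyGetD ck wi.2 "" = liar ∧ wi.1 ≠ liar)
def valP (ck : List String) (liar : String) (wi : String × Int) : Bool :=
  decide (0 ≤ wi.2 ∧ wi.2 < (ck.length : Int) ∧ PySem.List.pyGetD ck wi.2 "" = liar)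

-- first pass: B's deltas component is exactly A's first loop
lemma stepB1_fst (pd : PySem.Dict String Int) (ck gp : List String) (mult : Int)
    (dc : PySem.Dict String Int × PySem.Dict String Int) (vi : String × Int) :
    (stepB1 pd ck gp mult dc vi).1 = stepA1 pd ck gp mult dc.1 vi := by
  unfold stepB1 stepA1
  dsimp only
  split_ifs <;> first | rfl | omega

lemma foldB1_fst (pd : PySem.Dict String Int) (ck gp : List String) (mult : Int)
    (l : List (String × Int)) (dc : PySem.Dict String Int × PySem.Dict String Int) :
    (l.foldl (stepB1 pd ck gp mult) dc).1 = l.foldl (stepA1 pd ck gp mult) dc.1 := by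
  induction l generalizing dc with
  | nil => rfl
  | cons vi l ih =>
    simp only [List.foldl_cons]
    rw [ih, stepB1_fst]

-- first pass: B's counter component counts the valid votes per choice key
lemma stepB1_snd (pd : PySem.Dict String Int) (ck gp : List String) (mult : Int)
    (dc : PySem.Dict String Int × PySem.Dict String Int) (vi : String × Int) :
    (stepB1 pd ck gp mult dc vi).2 =
      if 0 ≤ vi.2 ∧ vi.2 < (ck.length : Int) then
        dc.2.insert (PySem.List.pyGetD ck vi.2 "")
          (dc.2.getD (PySem.List.pyGetD ck vi.2 "") 0 + 1)
      else dc.2 := by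
  unfold stepB1
  dsimp only
  split_ifs <;> rfl

lemma foldB1_snd_getD (pd : PySem.Dict String Int) (ck gp : List String) (mult : Int)
    (l : List (String × Int)) (dc : PySem.Dict String Int × PySem.Dict String Int) (k : String) :
    ((l.foldl (stepB1 pd ck gp mult) dc).2).getD k 0 =
      dc.2.getD k 0 + (l.countP (valP ck k) : Int) := by
  induction l generalizing dc with
  | nil => simp
  | cons vi l ih =>
    simp only [List.foldl_cons]
    rw [ih, stepB1_snd]
    simp only [List.countP_cons]
    by_cases h1 : 0 ≤ vi.2 ∧ vi.2 < (ck.length : Int)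
    · rw [if_pos h1, PySem.Dict.getD_insert]
      by_cases hk : k = PySem.List.pyGetD ck vi.2 ""
      · rw [if_pos hk]
        have hv : valP ck k vi = true := by simp [valP, h1, hk.symm]
        rw [hv]
        rw [hk]
        simp only [if_true]
        push_cast
        ring
      · rw [if_neg hk]
        have hv : valP ck k vi = false := by
          simp [valP, h1]
          intro h; exact absurd h.symm hk
        simp [hv]
    · rw [if_neg h1]
      have hv : valP ck k vi = false := by
        simp [valP]; intro h0 hn; exact absurd ⟨h0, hn⟩ h1
      simp [hv]

-- A's fooled loop is a countP
lemma fooledA_count (ck : List String) (l : List (String × Int)) (liar : String) :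
    fooledA ck l liar
    = (l.countP (fun wi => decide (wi.2 < (ck.length : Int) ∧ PySem.List.pyGetD ck wi.2 "" = liar ∧ wi.1 ≠ liar)) : Int) := by
  unfold fooledA
  rw [PySem.List.foldl_congr_mem l _
    (fun s wi => if (fun wi => decide (wi.2 < (ck.length : Int) ∧ PySem.List.pyGetD ck wi.2 "" = liar ∧ wi.1 ≠ liar)) wi = true then s + 1 else s) 0
    (by intro acc x _; simp)]
  rw [PySem.List.foldl_count_if]; ring

-- under the Pre_ bound A's count splits into in-range votes and wrapped votes
lemma count_split (ck : List String) (liar : String) (l : List (String × Int))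
    (hb : ∀ wi ∈ l, -(ck.length : Int) ≤ wi.2) :
    l.countP (fun wi => decide (wi.2 < (ck.length : Int) ∧ PySem.List.pyGetD ck wi.2 "" = liar ∧ wi.1 ≠ liar))
    = l.countP (posP ck liar) + l.countP (wrapP ck liar) := by
  induction l with
  | nil => rfl
  | cons wi l ih =>
    have hbw := hb wi (by simp)
    have ih' := ih (fun x hx => hb x (by simp [hx]))
    simp only [List.countP_cons, ih', posP, wrapP]
    by_cases h0 : 0 ≤ wi.2 <;> by_cases hneg : wi.2 < 0 <;> by_cases hn : wi.2 < (ck.length : Int) <;>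
      by_cases hk : PySem.List.pyGetD ck wi.2 "" = liar <;>
      by_cases hw : wi.1 ≠ liar <;> simp [h0, hneg, hn, hk, hw] <;> omega

-- the in-range count minus the liar's own valid self-vote is the fooling count
lemma count_self_split (ck : List String) (liar : String) (l : List (String × Int)) :
    l.countP (valP ck liar)
    = l.countP (posP ck liar) + l.countP (fun wi => valP ck liar wi && decide (wi.1 = liar)) := by
  induction l with
  | nil => rfl
  | cons wi l ih =>
    simp only [List.countP_cons, ih, posP, valP]
    by_cases h0 : (0 ≤ wi.2 ∧ wi.2 < (ck.length : Int) ∧ PySem.List.pyGetD ck wi.2 "" = liar) <;>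
      by_cases hw : wi.1 = liar <;> simp [h0, hw] <;> omega

lemma countP_fst_unique {ν : Type} (l : List (String × ν)) (hn : (l.map Prod.fst).Nodup)
    (k : String) (v : ν) (hm : (k, v) ∈ l) (q : String × ν → Bool) :
    l.countP (fun wi => q wi && decide (wi.1 = k)) = if q (k, v) then 1 else 0 := by
  induction l with
  | nil => simp at hm
  | cons x l ih =>
    simp only [List.map_cons, List.nodup_cons] at hn
    rcases List.mem_cons.mp hm with h | h
    · subst h
      have : l.countP (fun wi => q wi && decide (wi.1 = k)) = 0 := by
        rw [List.countP_eq_zero]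
        intro a ha
        have : a.1 ≠ k := by
          intro he
          have hmem := List.mem_map_of_mem (f := Prod.fst) ha
          rw [he] at hmem
          exact hn.1 (by simpa using hmem)
        simp [this]
      simp [List.countP_cons, this]
    · have hx : x.1 ≠ k := by
        intro he
        have := List.mem_map_of_mem (f := Prod.fst) h
        rw [← he] at this
        exact absurd this hn.1
      rw [List.countP_cons, ih hn.2 h]
      simp [hx]

lemma count_self (vd : PySem.Dict String Int) (ck : List String) (liar : String)
    (hn : vd.keys.Nodup) :
    (vd.items.countP (fun wi => valP ck liar wi && decide (wi.1 = liar)) : Int)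
      = selfVote vd ck liar := by
  unfold selfVote
  cases hget : vd.get? liar with
  | none =>
    have hnk : liar ∉ vd.keys := (PySem.Dict.get?_eq_none_iff_not_mem_keys vd liar).mp hget
    have : vd.items.countP (fun wi => valP ck liar wi && decide (wi.1 = liar)) = 0 := by
      rw [List.countP_eq_zero]
      intro a ha
      have : a.1 ≠ liar := by
        intro he
        exact hnk (by rw [← he]; exact PySem.Dict.mem_keys_of_mem_items vd ha)
      simp [this]
    simp [this]
  | some v =>
    have hm : (liar, v) ∈ vd.items := (PySem.Dict.get?_eq_some_iff_mem_items vd liar v hn).mp hget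
    have hnd : (vd.items.map Prod.fst).Nodup := hn
    rw [countP_fst_unique vd.items hnd liar v hm (valP ck liar)]
    by_cases h : (0 ≤ v ∧ v < (ck.length : Int) ∧ PySem.List.pyGetD ck v "" = liar) <;>
      simp [valP, h]

-- B's fooled value is the count of valid fooling votes
lemma fooledB_val (vd counts : PySem.Dict String Int) (ck : List String) (liar : String)
    (hnd : vd.keys.Nodup)
    (hcount : counts.getD liar 0 = (vd.items.countP (valP ck liar) : Int)) :
    counts.getD liar 0 - selfVote vd ck liar = (vd.items.countP (posP ck liar) : Int) := by
  rw [hcount, ← count_self vd ck liar hnd, count_self_split ck liar vd.items]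
  push_cast; ring

-- Python's negative in-range indexing
lemma pyGetD_neg (ck : List String) (i : Int) (d : String)
    (h1 : -(ck.length : Int) ≤ i) (h2 : i < 0) :
    PySem.List.pyGetD ck i d = ck.getD ((ck.length : Int) + i).toNat d := by
  unfold PySem.List.pyGetD PySem.List.pyGet? PySem.List.pyIdx?
  rw [if_neg (by omega), if_pos h1]
  have hk : ck.length - (-i).toNat = ((ck.length : Int) + i).toNat := by omega
  rw [hk]
  simp [List.getD_eq_getElem?_getD]

-- Python's non-negative indexing (out of range on both sides gives the default)
lemma pyGetD_nonneg (ck : List String) (i : Int) (d : String) (h : 0 ≤ i) :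
    PySem.List.pyGetD ck i d = ck.getD i.toNat d := by
  unfold PySem.List.pyGetD PySem.List.pyGet? PySem.List.pyIdx?
  rw [if_pos h]
  by_cases hlt : i < (ck.length : Int)
  · rw [if_pos hlt]
    simp [List.getD_eq_getElem?_getD]
  · rw [if_neg hlt]
    simp [List.getD_eq_getElem?_getD, List.getElem?_eq_none (by omega : ck.length ≤ i.toNat)]

-- membership in an assoc-list dict's keys is membership among the pairs' first components
lemma mem_keys_ofList {ν : Type} (ps : List (String × ν)) (k : String) :
    k ∈ (PySem.Dict.ofList ps).keys ↔ k ∈ ps.map Prod.fst := by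
  have h : PySem.Dict.ofList ps = ps.foldl (fun d p => d.insert p.1 p.2) PySem.Dict.empty := rfl
  rw [h, PySem.Dict.keys_foldl_insert_key ps Prod.fst _ PySem.Dict.empty]
  rw [show (PySem.Dict.empty : PySem.Dict String ν).keys = ([] : List String) from rfl]
  rw [show PySem.Set.update ([] : List String) (ps.map Prod.fst) = PySem.Set.ofList (ps.map Prod.fst) from rfl]
  exact PySem.Set.mem_ofList _ _

lemma stepA2_skip (vd : PySem.Dict String Int) (ck gp lfm : List String) (mult : Int)
    (d : PySem.Dict String Int) (liar : String) (hck : liar ∉ ck) :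
    stepA2 vd ck gp lfm mult d liar = d := by
  unfold stepA2; rw [if_pos hck]

lemma stepB2_skip (vd counts : PySem.Dict String Int) (ck gp lfm : List String) (mult : Int)
    (d : PySem.Dict String Int) (liar : String) (hck : liar ∉ ck) :
    stepB2 vd counts ck gp lfm mult d liar = d := by
  unfold stepB2
  rw [if_pos (by simpa [PySem.Set.mem_ofList] using hck)]

-- an insert that rewrites the value a key already holds is a no-op
lemma insert_self_noop (d : PySem.Dict String Int) (hn : d.keys.Nodup) (k : String) (v : Int)
    (h : d.get? k = some v) : d.insert k v = d := by
  apply PySem.Dict.ext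
  have hc : d.contains k = true := by
    rw [PySem.Dict.contains_eq_isSome_get?, h]; rfl
  rw [PySem.Dict.items_insert_of_contains d v hc]
  have : ∀ p ∈ d.items, (if p.1 == k then (k, v) else p) = p := by
    intro p hp
    by_cases hpk : p.1 = k
    · have hv : d.get? p.1 = some p.2 := PySem.Dict.get?_of_mem_items d hp hn
      rw [hpk, h] at hv
      have : p = (k, v) := by
        cases p; simp at hpk hv ⊢; exact ⟨hpk, hv.symm⟩
      simp [this]
    · simp [hpk]
  rw [List.map_congr_left this]
  simp

-- characterization of which keys the first loop creates an entry for
lemma foldA1_get?_none (pd : PySem.Dict String Int) (ck gp : List String) (mult : Int)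
    (l : List (String × Int)) (d : PySem.Dict String Int) (k : String) :
    ((l.foldl (stepA1 pd ck gp mult) d).get? k = none) ↔
      (d.get? k = none ∧ ∀ wi ∈ l,
        ¬ (wi.1 = k ∧ wi.1 ∈ pd.keys ∧ 0 ≤ wi.2 ∧ wi.2 < (ck.length : Int) ∧
           (PySem.List.pyGetD ck wi.2 "" = "truth" ∨ PySem.List.pyGetD ck wi.2 "" ∈ gp))) := by
  induction l generalizing d with
  | nil => simp
  | cons vi l ih =>
    simp only [List.foldl_cons, ih, List.mem_cons]
    constructor
    · rintro ⟨h1, h2⟩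
      refine ⟨?_, ?_⟩
      · -- d.get? k = none, from (stepA1 d vi).get? k = none
        unfold stepA1 at h1
        dsimp only at h1
        split_ifs at h1 <;>
          first
          | exact h1
          | (rw [PySem.Dict.get?_insert] at h1; split_ifs at h1 <;> simp_all)
      · intro wi hwi
        rcases hwi with hwi | hwi
        · -- wi = vi : if the insert condition held, (stepA1 d vi).get? k would be some
          subst hwi
          rintro ⟨he, hm, h0, hn, hkey⟩
          unfold stepA1 at h1
          dsimp only at h1
          rw [if_neg (not_not_intro hm), if_neg (by omega)] at h1
          rcases hkey with hkey | hkey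
          · rw [if_pos hkey, PySem.Dict.get?_insert, if_pos he.symm] at h1
            simp at h1
          · by_cases ht : PySem.List.pyGetD ck wi.2 "" = "truth"
            · rw [if_pos ht, PySem.Dict.get?_insert, if_pos he.symm] at h1
              simp at h1
            · rw [if_neg ht, if_pos hkey, PySem.Dict.get?_insert, if_pos he.symm] at h1
              simp at h1
        · exact h2 wi hwi
    · rintro ⟨h1, h2⟩
      refine ⟨?_, fun wi hwi => h2 wi (Or.inr hwi)⟩
      have hvi := h2 vi (Or.inl rfl)
      unfold stepA1
      dsimp only
      split_ifs with hm hr ht hg <;>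
        first
        | exact h1
        | (rw [PySem.Dict.get?_insert,
            if_neg (show ¬(k = vi.1) from fun hkvi =>
              hvi ⟨hkvi.symm, by assumption, by omega, by omega, by tauto⟩)]
           exact h1)

-- nodup keys are preserved by every loop step
lemma stepA1_nodup (pd : PySem.Dict String Int) (ck gp : List String) (mult : Int)
    (d : PySem.Dict String Int) (vi : String × Int) (h : d.keys.Nodup) :
    (stepA1 pd ck gp mult d vi).keys.Nodup := by
  unfold stepA1
  dsimp only
  split_ifs <;> first | exact h | exact PySem.Dict.nodup_keys_insert _ _ _ h

lemma foldA1_nodup (pd : PySem.Dict String Int) (ck gp : List String) (mult : Int)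
    (l : List (String × Int)) (d : PySem.Dict String Int) (h : d.keys.Nodup) :
    (l.foldl (stepA1 pd ck gp mult) d).keys.Nodup := by
  induction l generalizing d with
  | nil => exact h
  | cons vi l ih => exact ih _ (stepA1_nodup pd ck gp mult d vi h)

lemma stepA2_nodup (vd : PySem.Dict String Int) (ck gp lfm : List String) (mult : Int)
    (d : PySem.Dict String Int) (k : String) (h : d.keys.Nodup) :
    (stepA2 vd ck gp lfm mult d k).keys.Nodup := by
  unfold stepA2
  dsimp only
  split_ifs <;> first | exact h | exact PySem.Dict.nodup_keys_insert _ _ _ h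

lemma stepA2_get?_other (vd : PySem.Dict String Int) (ck gp lfm : List String) (mult : Int)
    (d : PySem.Dict String Int) (k k' : String) (hne : k' ≠ k) :
    (stepA2 vd ck gp lfm mult d k).get? k' = d.get? k' := by
  unfold stepA2
  dsimp only
  split_ifs <;> first | rfl | exact PySem.Dict.get?_insert_of_ne d _ hne

lemma stepB2_get?_other (vd counts : PySem.Dict String Int) (ck gp lfm : List String) (mult : Int)
    (d : PySem.Dict String Int) (k k' : String) (hne : k' ≠ k) :
    (stepB2 vd counts ck gp lfm mult d k).get? k' = d.get? k' := by
  unfold stepB2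
  dsimp only
  split_ifs <;> first | rfl | exact PySem.Dict.get?_insert_of_ne d _ hne

-- the heart: per liar, A's rescan step equals B's counter step
lemma step2_eq (vd counts dInit : PySem.Dict String Int) (ck gp lfm : List String) (mult : Int)
    (liar : String)
    (hnd : vd.keys.Nodup)
    (hcount : counts.getD liar 0 = (vd.items.countP (valP ck liar) : Int))
    (hb : ∀ wi ∈ vd.items, -(ck.length : Int) ≤ wi.2)
    (hnw : vd.items.countP (wrapP ck liar) ≠ 0 →
      (liar ∈ gp ∧ liar ∉ lfm) ∨
      (mult = 0 ∧ (vd.items.countP (posP ck liar) ≠ 0 ∨ dInit.get? liar ≠ none)))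
    (d : PySem.Dict String Int) (hdn : d.keys.Nodup) (hag : d.get? liar = dInit.get? liar) :
    stepA2 vd ck gp lfm mult d liar = stepB2 vd counts ck gp lfm mult d liar := by
  by_cases hck : liar ∈ ck
  case neg => rw [stepA2_skip _ _ _ _ _ _ _ hck, stepB2_skip _ _ _ _ _ _ _ _ hck]
  have hfA := fooledA_count ck vd.items liar
  rw [count_split ck liar vd.items hb] at hfA
  have hfB := fooledB_val vd counts ck liar hnd hcount
  by_cases hw : vd.items.countP (wrapP ck liar) = 0
  · -- no wrapped vote counts for this liar: the two fooled values coincide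
    have e1 : fooledA ck vd.items liar = (vd.items.countP (posP ck liar) : Int) := by
      rw [hfA, hw]; push_cast; ring
    unfold stepA2 stepB2
    rw [if_neg (not_not_intro hck),
      if_neg (not_not_intro ((PySem.Set.mem_ofList ck liar).mpr hck))]
    dsimp only
    rw [e1, hfB]
  · rcases hnw hw with ⟨hgp, hlfm⟩ | ⟨hm0, hrest⟩
    · -- game-provided, not lie-for-me: both steps leave the dict unchanged
      unfold stepA2 stepB2
      rw [if_neg (not_not_intro hck),
        if_neg (not_not_intro ((PySem.Set.mem_ofList ck liar).mpr hck))]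
      dsimp only
      simp [hgp, hlfm]
    · -- round_mult = 0: every written value is the value already held
      have hAne : fooledA ck vd.items liar ≠ 0 := by
        rw [hfA]
        have : 0 < vd.items.countP (wrapP ck liar) := Nat.pos_of_ne_zero hw
        push_cast
        omega
      unfold stepA2 stepB2
      rw [if_neg (not_not_intro hck),
        if_neg (not_not_intro ((PySem.Set.mem_ofList ck liar).mpr hck))]
      dsimp only
      rw [if_neg hAne, hfB, hm0]
      by_cases hpos : vd.items.countP (posP ck liar) = 0
      · -- B does nothing; A rewrites the existing entry with its own value
        have hget : ∃ v, d.get? liar = some v := by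
          rcases hrest with hpos' | hnone
          · exact absurd hpos hpos'
          · rw [hag]
            cases h : dInit.get? liar with
            | none => exact absurd h hnone
            | some v => exact ⟨v, rfl⟩
        obtain ⟨v, hv⟩ := hget
        have hgd : d.getD liar 0 = v := PySem.Dict.getD_of_get?_eq_some d 0 hv
        have hnoop : ∀ c : Int, d.insert liar (d.getD liar 0 + c * 0 * fooledA ck vd.items liar) = d := by
          intro c
          rw [show c * 0 * fooledA ck vd.items liar = 0 by ring, add_zero, hgd]
          exact insert_self_noop d hdn liar v hv
        rw [hpos]
        rw [if_pos (show ((0:Nat):Int) = 0 from rfl)]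
        split_ifs with hgp hlfm
        · exact hnoop 250
        · rfl
        · exact hnoop 500
      · -- both write, values coincide because the multiplier is 0
        have hBne : (vd.items.countP (posP ck liar) : Int) ≠ 0 := by
          push_cast
          omega
        rw [if_neg hBne]
        split_ifs <;> first | rfl | (congr 1; ring)

-- second loop, run in lockstep: the accumulators stay equal
lemma fold2_eq (vd counts dInit : PySem.Dict String Int) (ck gp lfm : List String) (mult : Int) :
    ∀ (keys : List String), keys.Nodup →
      (∀ k ∈ keys, ∀ d' : PySem.Dict String Int, d'.keys.Nodup → d'.get? k = dInit.get? k →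
        stepA2 vd ck gp lfm mult d' k = stepB2 vd counts ck gp lfm mult d' k) →
      ∀ d : PySem.Dict String Int, d.keys.Nodup → (∀ k ∈ keys, d.get? k = dInit.get? k) →
      keys.foldl (stepA2 vd ck gp lfm mult) d = keys.foldl (stepB2 vd counts ck gp lfm mult) d := by
  intro keys
  induction keys with
  | nil => intro _ _ d _ _; rfl
  | cons k keys ih =>
    intro hknd hstep d hdn hag
    simp only [List.foldl_cons]
    rw [← hstep k (by simp) d hdn (hag k (by simp))]
    apply ih (List.nodup_cons.mp hknd).2
      (fun k' hk' => hstep k' (List.mem_cons_of_mem _ hk'))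
      _ (stepA2_nodup _ _ _ _ _ _ _ hdn)
    intro k' hk'
    have hne : k' ≠ k := by
      rintro rfl
      exact (List.nodup_cons.mp hknd).1 hk'
    rw [stepA2_get?_other _ _ _ _ _ _ _ _ hne]
    exact hag k' (List.mem_cons_of_mem _ hk')

-- lookups through the second loop (for the tightness proof)
lemma get?_foldl_not_mem (step : PySem.Dict String Int → String → PySem.Dict String Int)
    (liar : String)
    (hother : ∀ d k, k ≠ liar → (step d k).get? liar = d.get? liar) :
    ∀ (keys : List String) (d0 : PySem.Dict String Int), liar ∉ keys →
      (keys.foldl step d0).get? liar = d0.get? liar := by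
  intro keys
  induction keys with
  | nil => intro d0 _; rfl
  | cons k keys ih =>
    intro d0 hnm
    simp only [List.foldl_cons]
    rw [ih _ (fun h => hnm (List.mem_cons_of_mem _ h))]
    exact hother d0 k (fun h => hnm (h ▸ List.mem_cons_self))

lemma get?_foldl_mem (step : PySem.Dict String Int → String → PySem.Dict String Int)
    (liar : String)
    (hother : ∀ d k, k ≠ liar → (step d k).get? liar = d.get? liar)
    (hself : ∀ d d' : PySem.Dict String Int, d.get? liar = d'.get? liar →
      (step d liar).get? liar = (step d' liar).get? liar) :
    ∀ (keys : List String) (d0 : PySem.Dict String Int), keys.Nodup → liar ∈ keys →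
      (keys.foldl step d0).get? liar = (step d0 liar).get? liar := by
  intro keys
  induction keys with
  | nil => intro d0 _ h; simp at h
  | cons k keys ih =>
    intro d0 hnd hmem
    simp only [List.foldl_cons]
    by_cases hk : k = liar
    · subst hk
      exact get?_foldl_not_mem step k hother keys _ (List.nodup_cons.mp hnd).1
    · have hmem' : liar ∈ keys := by
        rcases List.mem_cons.mp hmem with h | h
        · exact absurd h.symm hk
        · exact h
      rw [ih _ (List.nodup_cons.mp hnd).2 hmem']
      exact hself _ _ (hother d0 k hk)

lemma stepA2_get?_self_congr (vd : PySem.Dict String Int) (ck gp lfm : List String) (mult : Int)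
    (liar : String) (d d' : PySem.Dict String Int) (h : d.get? liar = d'.get? liar) :
    (stepA2 vd ck gp lfm mult d liar).get? liar = (stepA2 vd ck gp lfm mult d' liar).get? liar := by
  have hgd : d.getD liar 0 = d'.getD liar 0 := by
    rw [PySem.Dict.getD_eq_get?_getD, PySem.Dict.getD_eq_get?_getD, h]
  unfold stepA2
  dsimp only
  split_ifs <;>
    first
    | exact h
    | rw [PySem.Dict.get?_insert_self, PySem.Dict.get?_insert_self, hgd]

lemma stepB2_get?_self_congr (vd counts : PySem.Dict String Int) (ck gp lfm : List String)
    (mult : Int) (liar : String) (d d' : PySem.Dict String Int)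
    (h : d.get? liar = d'.get? liar) :
    (stepB2 vd counts ck gp lfm mult d liar).get? liar
      = (stepB2 vd counts ck gp lfm mult d' liar).get? liar := by
  have hgd : d.getD liar 0 = d'.getD liar 0 := by
    rw [PySem.Dict.getD_eq_get?_getD, PySem.Dict.getD_eq_get?_getD, h]
  unfold stepB2
  dsimp only
  split_ifs <;>
    first
    | exact h
    | rw [PySem.Dict.get?_insert_self, PySem.Dict.get?_insert_self, hgd]

-- ===== VERDICT (by name: the statement is the Claim_ definition above) =====
theorem score_question_py_spec : Claim_unchanged_score_question_py := by
  unfold Claim_unchanged_score_question_py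
  intro ck votes gp lfm mult players _hDom hPre
  unfold Spec_score_question_py
  intro hnD
  rw [A_eq, B_eq, foldB1_fst]
  refine congrArg PySem.Dict.items ?_
  refine fold2_eq (PySem.Dict.ofList votes) _ _ ck gp lfm mult
    (PySem.Dict.ofList players).keys (PySem.Dict.nodup_keys_ofList players) ?_ _
    (foldA1_nodup _ _ _ _ _ _ (PySem.Dict.nodup_keys_empty)) (fun k _ => rfl)
  intro k hk d' hd' hag'
  rcases hPre with hbnd | hnock
  case inr =>
    have hck := hnock k hk
    rw [stepA2_skip _ _ _ _ _ _ _ hck, stepB2_skip _ _ _ _ _ _ _ _ hck]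
  case inl =>
    refine step2_eq _ _ _ ck gp lfm mult k (PySem.Dict.nodup_keys_ofList votes) ?_ hbnd ?_ d' hd' hag'
    · rw [foldB1_snd_getD]
      simp
    · intro hw
      obtain ⟨wi, hwi, hwp⟩ := List.countP_pos_iff.mp (Nat.pos_of_ne_zero hw)
      rw [wrapP, decide_eq_true_eq] at hwp
      obtain ⟨hlt, hkey, hnev⟩ := hwp
      by_contra hcon
      apply hnD
      have hkD : ck.getD ((ck.length : Int) + wi.2).toNat "" = k := by
        rw [← pyGetD_neg ck wi.2 "" (hbnd wi hwi) hlt]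
        exact hkey
      refine ⟨k, (mem_keys_ofList players k).mp hk,
        wi, hwi, hlt, hbnd wi hwi, hkD, hnev, ?_, ?_⟩
      · by_cases hgp : k ∈ gp
        · right
          by_cases hlf : k ∈ lfm
          · exact hlf
          · exact absurd (Or.inl ⟨hgp, hlf⟩) hcon
        · left; exact hgp
      · by_cases hm : mult = 0
        · right
          have hpos : (PySem.Dict.ofList votes).items.countP (posP ck k) = 0 := by
            by_contra hp
            exact hcon (Or.inr ⟨hm, Or.inl hp⟩)
          have hnone : ((PySem.Dict.ofList votes).items.foldl
              (stepA1 (PySem.Dict.ofList players) ck gp mult) PySem.Dict.empty).get? k = none := by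
            by_contra hn
            exact hcon (Or.inr ⟨hm, Or.inr hn⟩)
          rw [foldA1_get?_none] at hnone
          intro wj hwj
          by_cases h0 : 0 ≤ wj.2
          case neg => exact Or.inl (by omega)
          by_cases h1 : wj.2 < (ck.length : Int)
          case neg => exact Or.inr (Or.inl (by omega))
          refine Or.inr (Or.inr ⟨?_, ?_⟩)
          · by_cases hc : ck.getD wj.2.toNat "" = k
            · right
              by_contra hne
              have hP : posP ck k wj = true := by
                rw [posP, decide_eq_true_eq]
                exact ⟨h0, h1, by rw [pyGetD_nonneg ck wj.2 "" h0]; exact hc, hne⟩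
              exact (List.countP_eq_zero.mp hpos wj hwj) hP
            · exact Or.inl hc
          · by_cases h1k : wj.1 = k
            · refine Or.inr ⟨?_, ?_⟩
              · intro hct
                exact hnone.2 wj hwj ⟨h1k, by rw [h1k]; exact hk, h0, h1,
                  Or.inl (by rw [pyGetD_nonneg ck wj.2 "" h0]; exact hct)⟩
              · intro hcg
                exact hnone.2 wj hwj ⟨h1k, by rw [h1k]; exact hk, h0, h1,
                  Or.inr (by rw [pyGetD_nonneg ck wj.2 "" h0]; exact hcg)⟩
            · exact Or.inl h1k
        · exact Or.inl hm

theorem score_question_py_changed : Claim_changed_score_question_py := by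
  unfold Claim_changed_score_question_py; decide

theorem score_question_py_tight : Claim_exact_score_question_py := by
  unfold Claim_exact_score_question_py
  intro ck votes gp lfm mult players _hDom hPre hD heq
  obtain ⟨k, hkmem', wi, hwi, hlt, hge, hkeq, hkne, hgplfm, hmultc⟩ := hD
  have hkp : k = PySem.List.pyGetD ck wi.2 "" := by
    rw [← hkeq, pyGetD_neg ck wi.2 "" hge hlt]
  subst hkp
  have hkmem : PySem.List.pyGetD ck wi.2 "" ∈ (PySem.Dict.ofList players).keys :=
    (mem_keys_ofList players _).mpr hkmem'
  rw [A_eq, B_eq, foldB1_fst] at heq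
  have hdeq := PySem.Dict.ext heq
  have hck : PySem.List.pyGetD ck wi.2 "" ∈ ck := by
    rw [pyGetD_neg ck wi.2 "" hge hlt]
    have hidx : ((ck.length : Int) + wi.2).toNat < ck.length := by omega
    rw [List.getD_eq_getElem ck "" hidx]
    exact List.getElem_mem hidx
  have hb : ∀ wj ∈ (PySem.Dict.ofList votes).items, -(ck.length : Int) ≤ wj.2 := by
    rcases hPre with h | h
    · exact h
    · exact absurd hck (h _ hkmem)
  have hcount : ((PySem.Dict.ofList votes).items.foldl
      (stepB1 (PySem.Dict.ofList players) ck gp mult)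
      (PySem.Dict.empty, PySem.Dict.empty)).2.getD (PySem.List.pyGetD ck wi.2 "") 0
      = ((PySem.Dict.ofList votes).items.countP (valP ck (PySem.List.pyGetD ck wi.2 "")) : Int) := by
    rw [foldB1_snd_getD]
    simp
  have hw1 : wrapP ck (PySem.List.pyGetD ck wi.2 "") wi = true := by
    rw [wrapP, decide_eq_true_eq]
    exact ⟨hlt, rfl, hkne⟩
  have hwrap : (PySem.Dict.ofList votes).items.countP (wrapP ck (PySem.List.pyGetD ck wi.2 "")) ≠ 0 := by
    have := List.countP_pos_iff.mpr ⟨wi, hwi, hw1⟩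
    omega
  have hfA : fooledA ck (PySem.Dict.ofList votes).items (PySem.List.pyGetD ck wi.2 "")
      = (((PySem.Dict.ofList votes).items.countP (posP ck (PySem.List.pyGetD ck wi.2 ""))
          + (PySem.Dict.ofList votes).items.countP (wrapP ck (PySem.List.pyGetD ck wi.2 "")) : Nat) : Int) := by
    rw [fooledA_count, count_split _ _ _ hb]
  have hAne : fooledA ck (PySem.Dict.ofList votes).items (PySem.List.pyGetD ck wi.2 "") ≠ 0 := by
    rw [hfA]
    have : 0 < (PySem.Dict.ofList votes).items.countP (wrapP ck (PySem.List.pyGetD ck wi.2 "")) :=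
      Nat.pos_of_ne_zero hwrap
    push_cast
    omega
  have hfB := fooledB_val (PySem.Dict.ofList votes) _ ck (PySem.List.pyGetD ck wi.2 "")
    (PySem.Dict.nodup_keys_ofList votes) hcount
  have h1 := get?_foldl_mem (stepA2 (PySem.Dict.ofList votes) ck gp lfm mult)
    (PySem.List.pyGetD ck wi.2 "")
    (fun d k hne => stepA2_get?_other _ _ _ _ _ _ _ _ hne.symm)
    (stepA2_get?_self_congr _ _ _ _ _ _)
    (PySem.Dict.ofList players).keys
    ((PySem.Dict.ofList votes).items.foldl
      (stepA1 (PySem.Dict.ofList players) ck gp mult) PySem.Dict.empty)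
    (PySem.Dict.nodup_keys_ofList players) hkmem
  have h2 := get?_foldl_mem (stepB2 (PySem.Dict.ofList votes)
      ((PySem.Dict.ofList votes).items.foldl
        (stepB1 (PySem.Dict.ofList players) ck gp mult)
        (PySem.Dict.empty, PySem.Dict.empty)).2 ck gp lfm mult)
    (PySem.List.pyGetD ck wi.2 "")
    (fun d k hne => stepB2_get?_other _ _ _ _ _ _ _ _ _ hne.symm)
    (stepB2_get?_self_congr _ _ _ _ _ _ _)
    (PySem.Dict.ofList players).keys
    ((PySem.Dict.ofList votes).items.foldl
      (stepA1 (PySem.Dict.ofList players) ck gp mult) PySem.Dict.empty)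
    (PySem.Dict.nodup_keys_ofList players) hkmem
  have hget : (stepA2 (PySem.Dict.ofList votes) ck gp lfm mult
      ((PySem.Dict.ofList votes).items.foldl
        (stepA1 (PySem.Dict.ofList players) ck gp mult) PySem.Dict.empty)
      (PySem.List.pyGetD ck wi.2 "")).get? (PySem.List.pyGetD ck wi.2 "")
      = (stepB2 (PySem.Dict.ofList votes)
          ((PySem.Dict.ofList votes).items.foldl
            (stepB1 (PySem.Dict.ofList players) ck gp mult)
            (PySem.Dict.empty, PySem.Dict.empty)).2 ck gp lfm mult
          ((PySem.Dict.ofList votes).items.foldl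
            (stepA1 (PySem.Dict.ofList players) ck gp mult) PySem.Dict.empty)
          (PySem.List.pyGetD ck wi.2 "")).get? (PySem.List.pyGetD ck wi.2 "") := by
    rw [← h1, ← h2, hdeq]
  unfold stepA2 stepB2 at hget
  rw [if_neg (not_not_intro hck),
    if_neg (not_not_intro ((PySem.Set.mem_ofList ck (PySem.List.pyGetD ck wi.2 "")).mpr hck))] at hget
  dsimp only at hget
  rw [if_neg hAne, hfB, hfA] at hget
  rcases hmultc with hm | htail
  · -- nonzero multiplier: the two written values differ by the wrapped votes
    by_cases hgp : PySem.List.pyGetD ck wi.2 "" ∈ gp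
    · have hlf : PySem.List.pyGetD ck wi.2 "" ∈ lfm := by
        rcases hgplfm with h | h
        · exact absurd hgp h
        · exact h
      simp only [hgp, hlf, if_true] at hget
      rw [PySem.Dict.get?_insert_self] at hget
      by_cases hp : (PySem.Dict.ofList votes).items.countP (posP ck (PySem.List.pyGetD ck wi.2 "")) = 0
      · rw [hp] at hget
        rw [if_pos (show ((0:Nat):Int) = 0 from rfl)] at hget
        cases hdi : ((PySem.Dict.ofList votes).items.foldl
            (stepA1 (PySem.Dict.ofList players) ck gp mult) PySem.Dict.empty).get?
            (PySem.List.pyGetD ck wi.2 "") with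
        | none => rw [hdi] at hget; simp at hget
        | some v =>
          rw [hdi, PySem.Dict.getD_of_get?_eq_some _ 0 hdi] at hget
          have := Option.some.inj hget
          have hz : 250 * mult * ((0 + (PySem.Dict.ofList votes).items.countP (wrapP ck (PySem.List.pyGetD ck wi.2 "")) : Nat) : Int) = 0 := by omega
          rcases mul_eq_zero.mp hz with hz1 | hz2
          · rcases mul_eq_zero.mp hz1 with h250 | hmz
            · norm_num at h250
            · exact hm hmz
          · have : 0 < (PySem.Dict.ofList votes).items.countP (wrapP ck (PySem.List.pyGetD ck wi.2 "")) :=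
              Nat.pos_of_ne_zero hwrap
            push_cast at hz2
            omega
      · rw [if_neg (by push_cast; omega : ¬(((PySem.Dict.ofList votes).items.countP (posP ck (PySem.List.pyGetD ck wi.2 "")) : Nat) : Int) = 0)] at hget
        rw [PySem.Dict.get?_insert_self] at hget
        have := Option.some.inj hget
        have hz : 250 * mult * (((PySem.Dict.ofList votes).items.countP (wrapP ck (PySem.List.pyGetD ck wi.2 "")) : Nat) : Int) = 0 := by push_cast at this ⊢; linarith
        rcases mul_eq_zero.mp hz with hz1 | hz2
        · rcases mul_eq_zero.mp hz1 with h250 | hmz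
          · norm_num at h250
          · exact hm hmz
        · have : 0 < (PySem.Dict.ofList votes).items.countP (wrapP ck (PySem.List.pyGetD ck wi.2 "")) :=
            Nat.pos_of_ne_zero hwrap
          push_cast at hz2
          omega
    · simp only [hgp, if_false] at hget
      rw [PySem.Dict.get?_insert_self] at hget
      by_cases hp : (PySem.Dict.ofList votes).items.countP (posP ck (PySem.List.pyGetD ck wi.2 "")) = 0
      · rw [hp] at hget
        rw [if_pos (show ((0:Nat):Int) = 0 from rfl)] at hget
        cases hdi : ((PySem.Dict.ofList votes).items.foldl
            (stepA1 (PySem.Dict.ofList players) ck gp mult) PySem.Dict.empty).get?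
            (PySem.List.pyGetD ck wi.2 "") with
        | none => rw [hdi] at hget; simp at hget
        | some v =>
          rw [hdi, PySem.Dict.getD_of_get?_eq_some _ 0 hdi] at hget
          have := Option.some.inj hget
          have hz : 500 * mult * ((0 + (PySem.Dict.ofList votes).items.countP (wrapP ck (PySem.List.pyGetD ck wi.2 "")) : Nat) : Int) = 0 := by omega
          rcases mul_eq_zero.mp hz with hz1 | hz2
          · rcases mul_eq_zero.mp hz1 with h500 | hmz
            · norm_num at h500
            · exact hm hmz
          · have : 0 < (PySem.Dict.ofList votes).items.countP (wrapP ck (PySem.List.pyGetD ck wi.2 "")) :=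
              Nat.pos_of_ne_zero hwrap
            push_cast at hz2
            omega
      · rw [if_neg (by push_cast; omega : ¬(((PySem.Dict.ofList votes).items.countP (posP ck (PySem.List.pyGetD ck wi.2 "")) : Nat) : Int) = 0)] at hget
        rw [PySem.Dict.get?_insert_self] at hget
        have := Option.some.inj hget
        have hz : 500 * mult * (((PySem.Dict.ofList votes).items.countP (wrapP ck (PySem.List.pyGetD ck wi.2 "")) : Nat) : Int) = 0 := by push_cast at this ⊢; linarith
        rcases mul_eq_zero.mp hz with hz1 | hz2
        · rcases mul_eq_zero.mp hz1 with h500 | hmz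
          · norm_num at h500
          · exact hm hmz
        · have : 0 < (PySem.Dict.ofList votes).items.countP (wrapP ck (PySem.List.pyGetD ck wi.2 "")) :=
            Nat.pos_of_ne_zero hwrap
          push_cast at hz2
          omega
  · -- zero multiplier: A creates an entry that B does not
    have hposC : (PySem.Dict.ofList votes).items.countP (posP ck (PySem.List.pyGetD ck wi.2 "")) = 0 := by
      rw [List.countP_eq_zero]
      intro wj hwj hP
      rw [posP, decide_eq_true_eq] at hP
      obtain ⟨h0, h1, h2, h3⟩ := hP
      rcases htail wj hwj with h | h | ⟨ha, _⟩
      · omega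
      · omega
      · rcases ha with ha | ha
        · exact ha (by rw [← pyGetD_nonneg ck wj.2 "" h0]; exact h2)
        · exact h3 ha
    have hnone : ((PySem.Dict.ofList votes).items.foldl
        (stepA1 (PySem.Dict.ofList players) ck gp mult) PySem.Dict.empty).get?
        (PySem.List.pyGetD ck wi.2 "") = none := by
      rw [foldA1_get?_none]
      refine ⟨by simp, ?_⟩
      rintro wj hwj ⟨h1, _, h3, h4, h5⟩
      rcases htail wj hwj with h | h | ⟨_, hb⟩
      · omega
      · omega
      · rcases hb with hb | ⟨hnt, hng⟩
        · exact hb h1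
        · rw [pyGetD_nonneg ck wj.2 "" h3] at h5
          rcases h5 with h5 | h5
          · exact hnt h5
          · exact hng h5
    rw [hposC, if_pos (show ((0:Nat):Int) = 0 from rfl), hnone] at hget
    rcases hgplfm with hngp | hlf
    · simp only [hngp, if_false] at hget
      rw [PySem.Dict.get?_insert_self] at hget
      simp at hget
    · by_cases hgp : PySem.List.pyGetD ck wi.2 "" ∈ gp
      · simp only [hgp, hlf, if_true] at hget
        rw [PySem.Dict.get?_insert_self] at hget
        simp at hget
      · simp only [hgp, if_false] at hget
        rw [PySem.Dict.get?_insert_self] at hget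
        simp at hget
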